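-- pv_equiv track=rewrite | github.com/areiljan/Python | EX/ex03_loops/secret_letter.py | secret_letter
-- ===== SOURCE A (Python) =====
-- def secret_letter(letter: str) -> bool:
--     """
--     Check if the given secret letter follows all the necessary rules. Return True if it does, else False.
--
--     Rules:
--     1. The letter has more uppercase letters than lowercase letters.
--     2. The sum of digits in the letter has to be equal to or less than the amount of uppercase letters.
--     3. The sum of digits in the letter has to be equal to or more than the amount of lowercase letters.
--
--     :param letter: secret letter
--     :return: validation
--     """
--
--
--     uppercaseletters = 0
--     lowercaseletters = 0
--     sumofdigits = 0
--
--     for a in letter: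
--         if a.isupper():
--             uppercaseletters += 1
--         elif a.islower():
--             lowercaseletters += 1
--         else:
--             sumofdigits += int(a)
--
--     if uppercaseletters > lowercaseletters and sumofdigits <= uppercaseletters and sumofdigits >= lowercaseletters:
--         return True
--     else:
--         return False
-- ===== SOURCE B (Python) =====
-- def secret_letter(letter: str) -> bool:
--     up = sum(1 for a in letter if a.isupper())
--     low = sum(1 for a in letter if a.islower())
--     digs = sum(int(a) for a in letter if not a.isupper() and not a.islower())
--     return low < up and low <= digs <= up
-- ===== Notes on version B (the rewrite author's own statement) =====
-- stated objective: alternative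
-- what changed: Replaces the single accumulating loop with three independent filtered scans (uppercase count, lowercase count, digit sum) combined in one inequality expression instead of the if/else.
import Mathlib
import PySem

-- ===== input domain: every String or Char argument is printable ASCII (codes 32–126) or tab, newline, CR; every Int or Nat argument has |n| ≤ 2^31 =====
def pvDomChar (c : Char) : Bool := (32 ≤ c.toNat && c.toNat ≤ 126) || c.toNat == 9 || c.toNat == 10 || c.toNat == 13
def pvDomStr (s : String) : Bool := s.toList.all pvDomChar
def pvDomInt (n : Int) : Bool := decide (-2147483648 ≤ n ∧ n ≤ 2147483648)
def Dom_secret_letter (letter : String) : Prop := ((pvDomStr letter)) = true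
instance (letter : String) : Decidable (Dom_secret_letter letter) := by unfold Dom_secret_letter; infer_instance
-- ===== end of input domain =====

-- B replaces A's single accumulating loop by three independent filtered scans combined
-- in one inequality (objective: alternative decomposition, same O(n) cost).


-- ===== PORT A =====
-- one pass: accumulate (uppercase count, lowercase count, digit sum); the else branch is
-- int(a), exact on Pre_ (every non-letter char is an ASCII digit, so int(a) = code - 48)
def secret_letter (letter : String) : Bool :=
  let st := letter.toList.foldl
    (fun (st : Int × Int × Int) a =>
      if PySem.Chars.isupper a then (st.1 + 1, st.2.1, st.2.2)
      else if PySem.Chars.islower a then (st.1, st.2.1 + 1, st.2.2)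
      else (st.1, st.2.1, st.2.2 + ((a.toNat : Int) - 48)))
    (0, 0, 0)
  if st.1 > st.2.1 ∧ st.2.2 ≤ st.1 ∧ st.2.2 ≥ st.2.1 then true else false

-- ===== PORT B =====
-- three independent filtered scans, one combined inequality
def secret_letter_alt (letter : String) : Bool :=
  let up : Int := ((letter.toList.filter (fun a => PySem.Chars.isupper a)).map (fun _ => (1 : Int))).sum
  let low : Int := ((letter.toList.filter (fun a => PySem.Chars.islower a)).map (fun _ => (1 : Int))).sum
  let digs : Int := ((letter.toList.filter (fun a => !PySem.Chars.isupper a && !PySem.Chars.islower a)).map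
      (fun a => ((a.toNat : Int) - 48))).sum
  decide (low < up ∧ low ≤ digs ∧ digs ≤ up)

-- ===== PRECONDITION & SPEC =====
-- Pre_ excludes exactly the strings on which A raises ValueError: those containing a
-- character that is neither a letter nor an ASCII digit (int(a) fails there).
def Pre_secret_letter (letter : String) : Prop :=
  (letter.toList.all
    (fun a => PySem.Chars.isupper a || PySem.Chars.islower a || PySem.Chars.isdigit a)) = true
instance (letter : String) : Decidable (Pre_secret_letter letter) := by
  unfold Pre_secret_letter; infer_instance
def pvWitness_secret_letter : String := "AB3c"

def Spec_secret_letter (letter : String) (out : Bool) : Prop := out = secret_letter_alt letter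
instance (letter : String) (out : Bool) : Decidable (Spec_secret_letter letter out) := by
  unfold Spec_secret_letter; infer_instance

-- ===== CLAIM (what is proved, stated in full; the proofs are below) =====
def Claim_equal_secret_letter : Prop := ∀ (letter : String), Dom_secret_letter letter → Pre_secret_letter letter → Spec_secret_letter letter (secret_letter letter)

-- ===== LEMMAS AND PROOFS =====
-- A's fold step, separated from its initial state
def pvStep (st : Int × Int × Int) (a : Char) : Int × Int × Int :=
  if PySem.Chars.isupper a then (st.1 + 1, st.2.1, st.2.2)
  else if PySem.Chars.islower a then (st.1, st.2.1 + 1, st.2.2)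
  else (st.1, st.2.1, st.2.2 + ((a.toNat : Int) - 48))

-- ASCII ranges A-Z and a-z are disjoint
theorem pvUpNotLow (c : Char) (h : PySem.Chars.isupper c = true) :
    PySem.Chars.islower c = false := by
  unfold PySem.Chars.isupper PySem.Chars.islower at *
  simp only [Bool.and_eq_true, decide_eq_true_eq, Char.le_def, UInt32.le_iff_toNat_le,
    show 'A'.val.toNat = 65 from rfl, show 'Z'.val.toNat = 90 from rfl] at h
  simp only [Bool.and_eq_false_iff, decide_eq_false_iff_not, Char.le_def, UInt32.le_iff_toNat_le,
    show 'a'.val.toNat = 97 from rfl, show 'z'.val.toNat = 122 from rfl]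
  omega

-- the fold's state is the three independent scans shifted by the initial state
theorem pvFold_eq (cs : List Char) (u l d : Int) :
    cs.foldl pvStep (u, l, d) =
      (u + ((cs.filter (fun a => PySem.Chars.isupper a)).map (fun _ => (1 : Int))).sum,
       l + ((cs.filter (fun a => PySem.Chars.islower a)).map (fun _ => (1 : Int))).sum,
       d + ((cs.filter (fun a => !PySem.Chars.isupper a && !PySem.Chars.islower a)).map
             (fun a => ((a.toNat : Int) - 48))).sum) := by
  induction cs generalizing u l d with
  | nil => simp
  | cons c cs ih =>
    simp only [List.foldl_cons, List.filter_cons, pvStep]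
    by_cases hu : PySem.Chars.isupper c
    · simp [hu, pvUpNotLow c hu, ih]; ring
    · by_cases hl : PySem.Chars.islower c
      · simp [hu, hl, ih]; ring
      · simp [hu, hl, ih]; ring

-- ===== VERDICT (by name: the statement is the Claim_ definition above) =====
theorem secret_letter_spec : Claim_equal_secret_letter := by
  intro letter _ _
  unfold Spec_secret_letter secret_letter secret_letter_alt
  have h := pvFold_eq letter.toList 0 0 0
  simp only [show (fun (st : Int × Int × Int) a =>
      if PySem.Chars.isupper a then (st.1 + 1, st.2.1, st.2.2)
      else if PySem.Chars.islower a then (st.1, st.2.1 + 1, st.2.2)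
      else (st.1, st.2.1, st.2.2 + ((a.toNat : Int) - 48))) = pvStep from rfl, h,
    zero_add, gt_iff_lt, ge_iff_le]
  split_ifs with hc
  · obtain ⟨h1, h2, h3⟩ := hc
    exact (decide_eq_true ⟨h1, h3, h2⟩).symm
  · symm
    simp only [decide_eq_false_iff_not]
    rintro ⟨h1, h2, h3⟩
    exact hc ⟨h1, h3, h2⟩
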